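-- pv_equiv track=rewrite | github.com/openstack/openstack-ansible | osa_toolkit/releasing.py | increment_version
-- ===== SOURCE A (Python) =====
-- def increment_version(old_version, increment):
--     """Compute the new version based on the previous value.
--     :param old_version: Parts of the version string for the last
--                         release.
--     :type old_version: list(str)
--     :param increment: Which positions to increment.
--     :type increment: tuple(int)
--     """
--     new_version_parts = []
--     clear = False
--     for cur, inc in zip(old_version, increment):
--         if clear:
--             new_version_parts.append("0")
--         else:
--             new_version_parts.append(str(int(cur) + inc))
--             if inc:
--                 clear = True
--     return new_version_parts
-- ===== SOURCE B (Python) =====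
-- def increment_version(old_version, increment):
--     """Compute the new version based on the previous value.
--
--     Pivot decomposition: find the first truthy increment position, emit the
--     incremented head up to and including it, then pad with "0"s (never calling
--     int() on the cleared tail).
--     """
--     n = min(len(old_version), len(increment))
--     pivot = next((i for i in range(n) if increment[i]), n)
--     head = [str(int(old_version[k]) + increment[k]) for k in range(min(pivot + 1, n))]
--     return head + ["0"] * (n - pivot - 1)
-- ===== Notes on version B (the rewrite author's own statement) =====
-- stated objective: alternative
-- what changed: Replaces A's single stateful loop with a 'clear' flag by a pivot decomposition: first locate the index of the first truthy increment, then build the result as an incremented head comprehension concatenated with a replicated '0' tail, never calling int() on the cleared tail.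
import Mathlib
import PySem

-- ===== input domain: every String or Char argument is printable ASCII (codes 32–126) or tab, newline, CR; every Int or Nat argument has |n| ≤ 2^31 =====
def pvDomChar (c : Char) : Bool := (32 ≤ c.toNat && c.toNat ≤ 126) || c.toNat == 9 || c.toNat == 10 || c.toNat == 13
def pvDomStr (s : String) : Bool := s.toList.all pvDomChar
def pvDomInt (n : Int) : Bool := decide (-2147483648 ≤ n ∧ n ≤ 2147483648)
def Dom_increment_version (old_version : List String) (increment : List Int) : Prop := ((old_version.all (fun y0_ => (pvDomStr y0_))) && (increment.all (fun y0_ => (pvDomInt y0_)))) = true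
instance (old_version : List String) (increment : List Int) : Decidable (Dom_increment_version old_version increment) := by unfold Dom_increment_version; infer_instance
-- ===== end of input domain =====

-- B replaces A's stateful clear-flag loop by a pivot-index decomposition (head comprehension ++ "0" tail); alternative, same cost.

-- ===== PORT A =====
-- A's loop over zip(old_version, increment) with accumulator (parts, clear).
def increment_version (old_version : List String) (increment : List Int) : List String :=
  ((old_version.zip increment).foldl
    (fun (st : List String × Bool) ci =>
      if st.2 then (st.1 ++ ["0"], st.2)
      else (st.1 ++ [PySem.Int.toStr ((PySem.Int.ofStr? ci.1).getD 0 + ci.2)],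
            ci.2 != 0))
    ([], false)).1

-- ===== PORT B =====
-- Source B: n = min of lengths; pivot = first i in range(n) with increment[i] truthy (else n);
-- head comprehension over range(min(pivot+1, n)); tail of (n - pivot - 1) "0"s.
def increment_version_alt (old_version : List String) (increment : List Int) : List String :=
  let n := min old_version.length increment.length
  let pivot := (((List.range n).find? (fun i => increment.getD i 0 != 0)).getD n)
  let head := (List.range (min (pivot + 1) n)).map
    (fun k => PySem.Int.toStr ((PySem.Int.ofStr? (old_version.getD k "")).getD 0 + increment.getD k 0))
  head ++ List.replicate (n - pivot - 1) "0"

-- ===== PRECONDITION & SPEC =====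
-- Pre_ excludes exactly the inputs where Python's int() raises ValueError: positions up to and
-- including the first truthy increment (int() is never called past it) must parse as ints.
def Pre_increment_version (old_version : List String) (increment : List Int) : Prop :=
  ∀ k, k < min old_version.length increment.length →
    (∀ j, j < k → increment.getD j 0 = 0) →
    (PySem.Int.ofStr? (old_version.getD k "")).isSome
instance (old_version : List String) (increment : List Int) : Decidable (Pre_increment_version old_version increment) := by unfold Pre_increment_version; infer_instance

def pvWitness_increment_version : List String × List Int := (["2", "7", "1"], [0, 1, 0])

def Spec_increment_version (old_version : List String) (increment : List Int) (out : List String) : Prop := out = increment_version_alt old_version increment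
instance (old_version : List String) (increment : List Int) (out : List String) : Decidable (Spec_increment_version old_version increment out) := by unfold Spec_increment_version; infer_instance

-- ===== CLAIM (what is proved, stated in full; the proofs are below) =====
def Claim_equal_increment_version : Prop := ∀ (old_version : List String) (increment : List Int), Dom_increment_version old_version increment → Pre_increment_version old_version increment → Spec_increment_version old_version increment (increment_version old_version increment)

-- ===== LEMMAS AND PROOFS =====

-- Reference function: structural recursion over the zipped list.
def pvRef : List (String × Int) → List String
  | [] => []
  | (c, i) :: t =>
      PySem.Int.toStr ((PySem.Int.ofStr? c).getD 0 + i) ::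
        (if i ≠ 0 then List.replicate t.length "0" else pvRef t)

-- A's fold with clear = true just appends one "0" per remaining element.
theorem pvFoldA_clear (z : List (String × Int)) (acc : List String) :
    (z.foldl
      (fun (st : List String × Bool) ci =>
        if st.2 then (st.1 ++ ["0"], st.2)
        else (st.1 ++ [PySem.Int.toStr ((PySem.Int.ofStr? ci.1).getD 0 + ci.2)], ci.2 != 0))
      (acc, true)) = (acc ++ List.replicate z.length "0", true) := by
  induction z generalizing acc with
  | nil => simp
  | cons h t ih =>
      simp [List.foldl_cons, ih, List.replicate_succ]

theorem pvFoldA_eq_ref (z : List (String × Int)) (acc : List String) :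
    ((z.foldl
      (fun (st : List String × Bool) ci =>
        if st.2 then (st.1 ++ ["0"], st.2)
        else (st.1 ++ [PySem.Int.toStr ((PySem.Int.ofStr? ci.1).getD 0 + ci.2)], ci.2 != 0))
      (acc, false))).1 = acc ++ pvRef z := by
  induction z generalizing acc with
  | nil => simp [pvRef]
  | cons h t ih =>
      by_cases hi : h.2 = 0
      · simp [List.foldl_cons, hi, pvRef, ih]
      · have hb : (h.2 != 0) = true := by simp [hi]
        simp only [List.foldl_cons, Bool.false_eq_true, if_false, hb]
        rw [pvFoldA_clear]
        simp [pvRef, hi]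

theorem increment_version_eq_ref (old_version : List String) (increment : List Int) :
    increment_version old_version increment = pvRef (old_version.zip increment) := by
  simpa using pvFoldA_eq_ref (old_version.zip increment) []

-- getD into the lists agrees with getD into the zip, below the zip length.
theorem pvZip_getD_fst (ov : List String) (inc : List Int) (k : Nat)
    (hk : k < min ov.length inc.length) :
    ov.getD k "" = ((ov.zip inc).getD k ("", 0)).1 := by
  induction ov generalizing inc k with
  | nil => simp at hk
  | cons c ot ih =>
      cases inc with
      | nil => simp at hk
      | cons i it =>
          cases k with
          | zero => rfl
          | succ k' =>
              simp only [List.zip_cons_cons, List.getD_cons_succ]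
              exact ih it k' (by simp at hk ⊢; omega)

theorem pvZip_getD_snd (ov : List String) (inc : List Int) (k : Nat)
    (hk : k < min ov.length inc.length) :
    inc.getD k 0 = ((ov.zip inc).getD k ("", 0)).2 := by
  induction ov generalizing inc k with
  | nil => simp at hk
  | cons c ot ih =>
      cases inc with
      | nil => simp at hk
      | cons i it =>
          cases k with
          | zero => rfl
          | succ k' =>
              simp only [List.zip_cons_cons, List.getD_cons_succ]
              exact ih it k' (by simp at hk ⊢; omega)

-- find? respects pointwise-equal predicates on the list's members.
theorem pvFind?_congr {α : Type} (l : List α) (p q : α → Bool)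
    (h : ∀ x ∈ l, p x = q x) : l.find? p = l.find? q := by
  induction l with
  | nil => rfl
  | cons a t ih =>
      simp only [List.find?_cons, h a (by simp)]
      cases q a <;> simp_all

-- B's port, rewritten over the zipped list.
def pvBz (z : List (String × Int)) : List String :=
  let n := z.length
  let pivot := (((List.range n).find? (fun i => (z.getD i ("", 0)).2 != 0)).getD n)
  ((List.range (min (pivot + 1) n)).map
    (fun k => PySem.Int.toStr ((PySem.Int.ofStr? (z.getD k ("", 0)).1).getD 0 + (z.getD k ("", 0)).2)))
    ++ List.replicate (n - pivot - 1) "0"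

theorem increment_version_alt_eq_Bz (old_version : List String) (increment : List Int) :
    increment_version_alt old_version increment = pvBz (old_version.zip increment) := by
  have hn : min old_version.length increment.length = (old_version.zip increment).length := by
    simp [List.length_zip]
  have hfind :
      (List.range (old_version.zip increment).length).find?
          (fun i => increment.getD i 0 != 0)
        = (List.range (old_version.zip increment).length).find?
          (fun i => ((old_version.zip increment).getD i ("", 0)).2 != 0) := by
    apply pvFind?_congr
    intro x hx
    rw [List.mem_range] at hx
    rw [pvZip_getD_snd old_version increment x (by simp [List.length_zip] at hx ⊢; omega)]
  simp only [increment_version_alt, pvBz, hn, hfind]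
  congr 1
  apply List.map_congr_left
  intro k hk
  rw [List.mem_range] at hk
  have hk' : k < min old_version.length increment.length := by
    simp [List.length_zip] at hk; omega
  rw [pvZip_getD_fst old_version increment k hk', pvZip_getD_snd old_version increment k hk']

-- Bz equals the reference function.
theorem pvBz_eq_ref (z : List (String × Int)) : pvBz z = pvRef z := by
  induction z with
  | nil => rfl
  | cons h t ih =>
      obtain ⟨c, i⟩ := h
      by_cases hi : i = 0
      · subst hi
        rw [pvRef, if_neg (by simp), ← ih]
        simp only [pvBz, List.length_cons, List.range_succ_eq_map, List.find?_cons,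
          List.getD_cons_zero, bne_self_eq_false, List.find?_map, Function.comp_def,
          List.getD_cons_succ]
        cases hpo : (List.range t.length).find? (fun k => (t.getD k ("", 0)).2 != 0) with
        | none =>
            simp [List.range_succ_eq_map, List.map_map, Function.comp_def]
        | some j =>
            have hj : j < t.length := by
              have := List.mem_of_find?_eq_some hpo
              simpa using this
            simp only [Option.map_some, Option.getD_some]
            have hm : min (j + 1 + 1) (t.length + 1) = min (j + 1) t.length + 1 := by omega
            rw [hm, List.range_succ_eq_map]
            simp [List.map_map, Function.comp_def]
      · have hb : (i != 0) = true := by simp [hi]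
        rw [pvRef, if_pos (by simpa using hi)]
        simp only [pvBz, List.length_cons, List.range_succ_eq_map, List.find?_cons,
          List.getD_cons_zero, hb]
        simp

-- ===== VERDICT (by name: the statement is the Claim_ definition above) =====
theorem increment_version_spec : Claim_equal_increment_version := by
  intro ov inc _ _
  unfold Spec_increment_version
  rw [increment_version_eq_ref, increment_version_alt_eq_Bz, pvBz_eq_ref]
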